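-- pv_equiv track=rewrite | github.com/jbkarvens/baekjoon | 백준/Ruby/18542. Permutant/Permutant.py | resultant
-- ===== SOURCE A (Python) =====
-- def resultant(A,B):
--     mod = 10**9+7
--     n,m = len(A)-1,len(B)-1
--     res = 1
--
--     if m>n:
--         n,m=m,n
--         A,B=B,A
--         if (n*m)&1:
--             res = -1
--     if m==0:
--         return (res*pow(B[0],n,mod))%mod
--
--     R = A[:]
--     b_inv = pow(B[-1],-1,mod)
--     for i in reversed(range(m,n+1)):
--         if R[i]:
--             t = (R[i]*b_inv)%mod
--             for j in range(m+1):
--                 R[i-j] = (R[i-j]-t*B[m-j])%mod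
--
--     while len(R)>0 and R[-1]==0:
--         R.pop()
--         if len(R)==0:
--             return 0
--     res = (res*pow(B[-1],n-len(R)+1,mod))%mod
--     return (res*resultant(R,B))%mod
-- ===== SOURCE B (Python) =====
-- def resultant(A, B):
--     mod = 10**9 + 7
--     res = 1
--     while True:
--         n, m = len(A) - 1, len(B) - 1
--         if m > n:
--             if (n * m) & 1:
--                 res = -res
--             n, m = m, n
--             A, B = B, A
--         if m == 0:
--             return res * pow(B[0], n, mod) % mod
--         binv = pow(B[-1], -1, mod)
--         rb = B[::-1]
--         S = A[::-1]
--         lead = []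
--         while len(S) > m:
--             if S[0]:
--                 t = S[0] * binv % mod
--                 S = [(x - t * y) % mod for x, y in zip(S, rb)] + S[m + 1:]
--             lead.append(S[0])
--             S = S[1:]
--         T = lead + S
--         while T and T[0] == 0:
--             T = T[1:]
--         if not T:
--             return 0
--         res = res * pow(B[-1], n - len(T) + 1, mod) % mod
--         A = T[::-1]
-- ===== Notes on version B (the rewrite author's own statement) =====
-- stated objective: alternative
-- what changed: Replaced the tail recursion with in-place indexed updates (R[i-j] over reversed(range(m,n+1)) plus trailing-zero pops) by an iterative while-loop over reversed coefficient lists that peels the leading coefficient head-by-head with a zip-based elementwise subtraction, collects processed heads in an accumulator, strips leading zeros, and folds the sign and leading-coefficient powers into one running accumulator res.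
import Mathlib
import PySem

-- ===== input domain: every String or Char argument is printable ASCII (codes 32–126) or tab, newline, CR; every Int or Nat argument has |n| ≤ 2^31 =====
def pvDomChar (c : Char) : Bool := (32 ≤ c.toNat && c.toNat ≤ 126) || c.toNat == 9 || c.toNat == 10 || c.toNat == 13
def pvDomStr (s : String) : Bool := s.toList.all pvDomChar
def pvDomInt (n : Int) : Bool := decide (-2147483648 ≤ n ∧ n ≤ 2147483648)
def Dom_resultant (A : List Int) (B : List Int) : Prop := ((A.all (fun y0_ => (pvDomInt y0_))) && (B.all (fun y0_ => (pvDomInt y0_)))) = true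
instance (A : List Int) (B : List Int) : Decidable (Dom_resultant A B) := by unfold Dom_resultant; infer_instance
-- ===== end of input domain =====

-- B replaces A's tail recursion with in-place indexed updates by an iterative loop over the
-- reversed coefficient lists, peeling the leading coefficient head-by-head with a zip-based
-- subtraction and a running sign/power accumulator (objective: alternative, no speed claim).

-- ===== PORT A =====
def pvM : Int := 1000000007            -- mod = 10**9+7

-- xs[i]; every use below has i in range (indices are derived from the actual lengths)
def pvIdx (xs : List Int) (i : Int) : Int := (PySem.List.pyGet? xs i).getD 0

-- binary modular exponentiation mod pvM (hand-written: the huge fixed exponent below makes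
-- the naive b^e infeasible to evaluate; computes exactly b^e mod pvM, in [0, pvM) for odd e)
def pvPowM (b : Int) (e : Nat) : Int :=
  if _e0 : e = 0 then 1
  else
    let r := pvPowM (PySem.Int.mod (b * b) pvM) (e / 2)
    if e % 2 = 1 then PySem.Int.mod (b * r) pvM else r
  decreasing_by exact Nat.div_lt_self (Nat.pos_of_ne_zero _e0) (by norm_num)

-- pow(b, -1, mod): Python computes the inverse by extended gcd; by Fermat (pvM prime) it is
-- b^(pvM-2) mod pvM whenever b is invertible mod pvM — the exact value Python returns there;
-- Pre_ excludes the inputs where Python raises ValueError instead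
def pvInv (b : Int) : Int := pvPowM b 1000000005

-- R = A[:]; for i in reversed(range(m, n+1)): if R[i]: t = ...; for j in range(m+1): R[i-j] = ...
def pvReduce (A B : List Int) (m n binv : Int) : List Int :=
  ((PySem.List.pyRange m (n + 1) 1).reverse).foldl (fun R i =>
    if pvIdx R i ≠ 0 then
      let t := PySem.Int.mod (pvIdx R i * binv) pvM
      (PySem.List.pyRange 0 (m + 1) 1).foldl (fun R j =>
        PySem.List.pySetD R (i - j) (PySem.Int.mod (pvIdx R (i - j) - t * pvIdx B (m - j)) pvM)) R
    else R) A

-- while len(R)>0 and R[-1]==0: R.pop()   (popping from the back = dropping zeros off the reverse)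
def pvDropZ : List Int → List Int
  | [] => []
  | x :: xs => if x = 0 then pvDropZ xs else x :: xs
def pvStrip (R : List Int) : List Int := (pvDropZ R.reverse).reverse

-- b_inv = pow(B[-1], -1, mod); R = A[:] reduced in place; then the trailing zeros popped
def pvRrem (A B : List Int) (m n : Int) : List Int :=
  pvStrip (pvReduce A B m n (pvInv (pvIdx B (-1))))

-- A's body after the swap-if, with res : the sign computed there and rec : the recursive call;
-- the '... if len(R)==0: return 0' path returns 0, the last line is (res*resultant(R,B))%mod
def pvBody (rec : List Int → List Int → Int) (A B : List Int) (n m res : Int) : Int :=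
  if m = 0 then PySem.Int.mod (res * PySem.Int.powMod (pvIdx B 0) n.toNat pvM) pvM
  else if (pvRrem A B m n).length = 0 then 0
  else
    PySem.Int.mod
      (PySem.Int.mod (res * PySem.Int.powMod (pvIdx B (-1)) (n - ((pvRrem A B m n).length : Int) + 1).toNat pvM) pvM
        * rec (pvRrem A B m n) B) pvM

-- fuel-totalized recursion (Python's recursion is infinite only where it raises, which Pre_
-- excludes; inside Pre_ the depth is < len(A)+len(B), so the fuel is never exhausted)
def resultantGo : Nat → List Int → List Int → Int
  | 0, _, _ => 0
  | fuel + 1, A, B =>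
    let n : Int := (A.length : Int) - 1
    let m : Int := (B.length : Int) - 1
    if m > n then
      pvBody (resultantGo fuel) B A m n (if PySem.Int.mod (n * m) 2 = 1 then -1 else 1)
    else
      pvBody (resultantGo fuel) A B n m 1

def resultant (A : List Int) (B : List Int) : Int := resultantGo (A.length + B.length) A B

-- ===== PORT B =====
-- S = [(x - t*y) % mod for x, y in zip(S, rb)] + S[m+1:]   (zip truncates at the shorter list)
def altStep (m : Nat) (t : Int) (rb S : List Int) : List Int :=
  List.zipWith (fun x y => PySem.Int.mod (x - t * y) pvM) S rb ++ S.drop (m + 1)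

-- the inner 'while len(S) > m' loop, carrying the accumulator lead; fuel-totalized (each pass
-- shortens S by one, so the fuel len(A) handed to it below is never exhausted)
def altLoop (m : Nat) (binv : Int) (rb : List Int) : Nat → List Int → List Int → List Int × List Int
  | 0, lead, S => (lead, S)
  | f + 1, lead, S =>
    if S.length ≤ m then (lead, S)
    else
      let S' := if S.headD 0 ≠ 0 then altStep m (PySem.Int.mod (S.headD 0 * binv) pvM) rb S else S
      altLoop m binv rb f (lead ++ [S'.headD 0]) S'.tail

-- while T and T[0] == 0: T = T[1:]
def altTrim : List Int → List Int
  | [] => []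
  | x :: xs => if x = 0 then altTrim xs else x :: xs

-- lead, S after the inner loop, concatenated and stripped of leading zeros ('T' in Source B)
def altRem (A B : List Int) (m : Int) : List Int :=
  altTrim ((altLoop m.toNat (pvInv (pvIdx B (-1))) B.reverse A.length [] A.reverse).1
    ++ (altLoop m.toNat (pvInv (pvIdx B (-1))) B.reverse A.length [] A.reverse).2)

-- one pass of B's outer 'while True' after the swap-if; rec = the next iteration (new A, B, res)
def altBody (rec : List Int → List Int → Int → Int) (A B : List Int) (n m res : Int) : Int :=
  if m = 0 then PySem.Int.mod (res * PySem.Int.powMod (pvIdx B 0) n.toNat pvM) pvM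
  else if altRem A B m = [] then 0
  else
    rec (altRem A B m).reverse B
      (PySem.Int.mod (res * PySem.Int.powMod (pvIdx B (-1)) (n - ((altRem A B m).length : Int) + 1).toNat pvM) pvM)

-- the outer 'while True' loop carrying (A, B, res); fuel-totalized like A's recursion
def altOuter : Nat → List Int → List Int → Int → Int
  | 0, _, _, _ => 0
  | fuel + 1, A, B, res =>
    let n : Int := (A.length : Int) - 1
    let m : Int := (B.length : Int) - 1
    if m > n then
      altBody (altOuter fuel) B A m n (if PySem.Int.mod (n * m) 2 = 1 then -res else res)
    else
      altBody (altOuter fuel) A B n m res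

def resultant_alt (A : List Int) (B : List Int) : Int := altOuter (A.length + B.length) A B 1

-- ===== PRECONDITION & SPEC =====
-- Pre_ excludes exactly the inputs where Python A raises at the top level: an empty A or B
-- (IndexError on B[-1]/B[0]) and a divisor of degree ≥ 1 whose trailing coefficient is
-- ≡ 0 mod 10^9+7 (ValueError from pow(B[-1], -1, mod)).
def Pre_resultant (A : List Int) (B : List Int) : Prop :=
  A ≠ [] ∧ B ≠ [] ∧
    (if B.length > A.length then A.length = 1 ∨ PySem.Int.mod (A.getLastD 0) pvM ≠ 0
     else B.length = 1 ∨ PySem.Int.mod (B.getLastD 0) pvM ≠ 0)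
instance (A : List Int) (B : List Int) : Decidable (Pre_resultant A B) := by
  unfold Pre_resultant; infer_instance

def pvWitness_resultant : List Int × List Int := ([1, 2, 1], [3, 1])

def Spec_resultant (A : List Int) (B : List Int) (out : Int) : Prop := out = resultant_alt A B
instance (A : List Int) (B : List Int) (out : Int) : Decidable (Spec_resultant A B out) := by
  unfold Spec_resultant; infer_instance

-- ===== CLAIM (what is proved, stated in full; the proofs are below) =====
def Claim_equal_resultant : Prop := ∀ (A : List Int) (B : List Int), Dom_resultant A B → Pre_resultant A B → Spec_resultant A B (resultant A B)

-- ===== LEMMAS AND PROOFS =====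

-- PySem.Int.mod by the fixed positive modulus is Int.emod
theorem pvmod_def (x : Int) : PySem.Int.mod x pvM = x % pvM :=
  PySem.Int.mod_eq_emod_of_pos (by norm_num [pvM])

theorem pvmod_mul_left (a b : Int) : (a % pvM * b) % pvM = (a * b) % pvM := by
  conv_rhs => rw [Int.mul_emod]
  rw [Int.mul_emod, Int.emod_emod_of_dvd _ dvd_rfl]

theorem pvmod_mul_right (a b : Int) : (a * (b % pvM)) % pvM = (a * b) % pvM := by
  conv_rhs => rw [Int.mul_emod]
  rw [Int.mul_emod, Int.emod_emod_of_dvd _ dvd_rfl]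

-- A's inner j-loop and outer i-step, named so the proofs can speak about them
def aInner (B : List Int) (m t i : Int) (R : List Int) : List Int :=
  (PySem.List.pyRange 0 (m + 1) 1).foldl (fun R j =>
    PySem.List.pySetD R (i - j) (PySem.Int.mod (pvIdx R (i - j) - t * pvIdx B (m - j)) pvM)) R

def aStep (B : List Int) (m binv : Int) (R : List Int) (i : Int) : List Int :=
  if pvIdx R i ≠ 0 then aInner B m (PySem.Int.mod (pvIdx R i * binv) pvM) i R else R

theorem pvReduce_eq (A B : List Int) (m n binv : Int) :
    pvReduce A B m n binv = ((PySem.List.pyRange m (n + 1) 1).reverse).foldl (aStep B m binv) A := rfl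

theorem altTrim_eq (l : List Int) : altTrim l = pvDropZ l := by
  induction l with
  | nil => rfl
  | cons x xs ih => simp only [altTrim, pvDropZ, ih]

theorem headD_cons_tail {l : List Int} (h : l ≠ []) : l.headD 0 :: l.tail = l := by
  cases l with
  | nil => exact absurd rfl h
  | cons a t => rfl

-- the j-loop updates the last m'+1 positions of Q ++ Z pointwise with Z[r] - t*B[r], top down
theorem jloop (B Q Z Lrev : List Int) (m' : Nat) (t : Int)
    (hZ : Z.length = m' + 1) (hB : B.length = m' + 1) :
    ∀ c : Nat, c ≤ m' + 1 →
      (PySem.List.pyRange 0 (c : Int) 1).foldl (fun R j =>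
          PySem.List.pySetD R (((Q.length + m' : Nat) : Int) - j)
            (PySem.Int.mod (pvIdx R (((Q.length + m' : Nat) : Int) - j) - t * pvIdx B ((m' : Int) - j)) pvM))
          (Q ++ (Z ++ Lrev))
      = Q ++ (Z.take (m' + 1 - c) ++
          (List.zipWith (fun z b => PySem.Int.mod (z - t * b) pvM) (Z.drop (m' + 1 - c)) (B.drop (m' + 1 - c)) ++ Lrev)) := by
  intro c
  induction c with
  | zero =>
    intro _
    rw [show ((0 : Nat) : Int) = 0 from rfl, PySem.List.pyRange_one_eq_nil le_rfl]
    simp [List.take_of_length_le (le_of_eq hZ), List.drop_of_length_le (le_of_eq hZ)]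
  | succ c ih =>
    intro hc
    have hcm : c ≤ m' := by omega
    set r : Nat := m' - c with hr
    have hre : m' + 1 - c = r + 1 := by omega
    have hre' : m' + 1 - (c + 1) = r := by omega
    have hrZ : r < Z.length := by omega
    have hrB : r < B.length := by omega
    have hcast : ((c + 1 : Nat) : Int) = (c : Int) + 1 := by push_cast; ring
    rw [hcast, PySem.List.pyRange_one_succ_right (by positivity), List.foldl_append,
      ih (by omega), hre, hre']
    -- the one remaining update, at j = c
    have hidx : ((Q.length + m' : Nat) : Int) - (c : Int) = ((Q.length + r : Nat) : Int) := by
      push_cast; omega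
    have hidxB : ((m' : Nat) : Int) - (c : Int) = ((r : Nat) : Int) := by omega
    have htake : (Z.take (r + 1)).length = r + 1 := by simp; omega
    -- value read at position Q.length + r is Z[r]
    have hget : pvIdx (Q ++ (Z.take (r + 1) ++
        (List.zipWith (fun z b => PySem.Int.mod (z - t * b) pvM) (Z.drop (r + 1)) (B.drop (r + 1)) ++ Lrev)))
        ((Q.length + r : Nat) : Int) = Z[r] := by
      simp only [pvIdx, PySem.List.pyGet?_natCast]
      rw [List.getElem?_append_right (by omega), Nat.add_sub_cancel_left,
        List.getElem?_append_left (by omega : r < (Z.take (r + 1)).length),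
        List.getElem?_take_of_lt (by omega), List.getElem?_eq_getElem hrZ]
      rfl
    have hgetB : pvIdx B ((r : Nat) : Int) = B[r] := by
      simp only [pvIdx, PySem.List.pyGet?_natCast]
      rw [List.getElem?_eq_getElem hrB]
      rfl
    simp only [List.foldl_cons, List.foldl_nil, hidx, hidxB, hget, hgetB,
      PySem.List.pySetD_natCast]
    rw [List.set_append_right _ _ (by omega), Nat.add_sub_cancel_left,
      List.set_append_left _ _ (by omega : r < (Z.take (r + 1)).length),
      List.take_succ_eq_append_getElem hrZ,
      List.set_append_right _ _ (by simp),
      show r - (Z.take r).length = 0 by simp; omega,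
      List.set_cons_zero,
      List.drop_eq_getElem_cons hrZ, List.drop_eq_getElem_cons hrB,
      List.zipWith_cons_cons]
    simp only [List.append_assoc, List.cons_append, List.nil_append]
-- one application of A's i-step, in B's reversed-list form
theorem aStep_eq (B P Lrev : List Int) (m' k : Nat) (binv : Int)
    (hP : P.length = k + 1) (hk : m' ≤ k) (hB : B.length = m' + 1) :
    aStep B (m' : Int) binv (P ++ Lrev) ((k : Nat) : Int) =
      (if P.reverse.headD 0 ≠ 0
        then altStep m' (PySem.Int.mod (P.reverse.headD 0 * binv) pvM) B.reverse P.reverse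
        else P.reverse).reverse ++ Lrev := by
  have h1 : pvIdx (P ++ Lrev) ((k : Nat) : Int) = P.reverse.headD 0 := by
    simp only [pvIdx, PySem.List.pyGet?_natCast, List.headD_eq_head?_getD, List.head?_reverse,
      List.getLast?_eq_getElem?, hP]
    rw [List.getElem?_append_left (by omega)]
    simp
  unfold aStep
  rw [h1]
  by_cases hz : P.reverse.headD 0 ≠ 0
  · rw [if_pos hz, if_pos hz]
    -- split P into Q ++ Z
    set t := PySem.Int.mod (P.reverse.headD 0 * binv) pvM with ht
    set Q := P.take (k - m') with hQ
    set Z := P.drop (k - m') with hZdef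
    have hQlen : Q.length = k - m' := by simp [hQ]; omega
    have hZlen : Z.length = m' + 1 := by simp [hZdef]; omega
    have hPQZ : P = Q ++ Z := (List.take_append_drop _ _).symm
    have hkQ : ((k : Nat) : Int) = ((Q.length + m' : Nat) : Int) := by rw [hQlen]; push_cast; omega
    have hbound : ((m' : Nat) : Int) + 1 = ((m' + 1 : Nat) : Int) := by push_cast; ring
    unfold altStep
    have hrevP : P.reverse = Z.reverse ++ Q.reverse := by rw [hPQZ, List.reverse_append]
    have hBrev : B.reverse = B.reverse ++ ([] : List Int) := by simp
    have hzip : List.zipWith (fun x y => PySem.Int.mod (x - t * y) pvM) P.reverse B.reverse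
        = (List.zipWith (fun x y => PySem.Int.mod (x - t * y) pvM) Z B).reverse := by
      rw [hrevP]
      conv_lhs => rw [hBrev]
      rw [List.zipWith_append (by simp [hZlen, hB])]
      simp [List.reverse_zipWith (by omega : Z.length = B.length)]
    have hdrop : P.reverse.drop (m' + 1) = Q.reverse := by
      rw [List.drop_reverse, hP]
      have : k + 1 - (m' + 1) = k - m' := by omega
      rw [this, ← hQ]
    rw [hzip, hdrop, ← List.reverse_append, List.reverse_reverse]
    -- now compute the A side by the j-loop characterisation
    unfold aInner
    rw [hkQ, hbound]
    conv_lhs => rw [hPQZ, List.append_assoc]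
    rw [jloop B Q Z Lrev m' t hZlen hB (m' + 1) le_rfl]
    simp [List.append_assoc]
  · rw [if_neg hz, if_neg hz, List.reverse_reverse]

-- the length of B's reduced list is unchanged
theorem altStep_length (B P : List Int) (m' : Nat) (t : Int)
    (hP : m' + 1 ≤ P.length) (hB : B.length = m' + 1) :
    (altStep m' t B.reverse P.reverse).length = P.length := by
  simp [altStep]
  omega

theorem altLoop_stop (m' : Nat) (binv : Int) (rb : List Int) (f : Nat) (lead S : List Int)
    (h : S.length ≤ m') : altLoop m' binv rb f lead S = (lead, S) := by
  cases f <;> simp [altLoop, h]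

-- the loop invariant: B's (lead, S) pair is A's partially reduced list, reversed
theorem loopInv (B : List Int) (m' : Nat) (binv : Int) (hB : B.length = m' + 1) :
    ∀ (d f : Nat), d < f → ∀ (lead P : List Int), P.length = m' + 1 + d →
      (altLoop m' binv B.reverse f lead P.reverse).1 ++ (altLoop m' binv B.reverse f lead P.reverse).2
      = (((PySem.List.pyRange (m' : Int) (((m' + d : Nat) : Int) + 1) 1).reverse).foldl
          (aStep B (m' : Int) binv) (P ++ lead.reverse)).reverse := by
  intro d
  induction d with
  | zero =>
    intro f hf lead P hP
    obtain ⟨f', rfl⟩ : ∃ f', f = f' + 1 := ⟨f - 1, by omega⟩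
    have hgt : ¬ P.reverse.length ≤ m' := by simp only [List.length_reverse, hP]; omega
    simp only [altLoop]
    rw [if_neg hgt]
    have hlen : (if P.reverse.headD 0 ≠ 0
        then altStep m' (PySem.Int.mod (P.reverse.headD 0 * binv) pvM) B.reverse P.reverse
        else P.reverse).length = P.length := by
      split
      · exact altStep_length B P m' _ (by omega) hB
      · simp
    set S' := (if P.reverse.headD 0 ≠ 0
        then altStep m' (PySem.Int.mod (P.reverse.headD 0 * binv) pvM) B.reverse P.reverse
        else P.reverse) with hS'
    have hS'len : S'.length = m' + 1 := by rw [hlen, hP]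
    have hS'cons : S'.headD 0 :: S'.tail = S' :=
      headD_cons_tail (by intro hnil; rw [hnil] at hS'len; simp at hS'len)
    rw [altLoop_stop _ _ _ _ _ _ (by simp only [List.length_tail, hS'len]; omega)]
    have hrange : PySem.List.pyRange ((m' : Nat) : Int) (((m' + 0 : Nat) : Int) + 1) 1
        = [((m' : Nat) : Int)] := by
      rw [Nat.add_zero, PySem.List.pyRange_one_singleton]
    rw [hrange, List.reverse_singleton, List.foldl_cons, List.foldl_nil,
      aStep_eq B P lead.reverse m' m' binv (by omega) le_rfl hB, ← hS']
    simp only [List.reverse_append, List.reverse_reverse]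
    rw [List.append_assoc, List.singleton_append, hS'cons]
  | succ d ih =>
    intro f hf lead P hP
    obtain ⟨f', rfl⟩ : ∃ f', f = f' + 1 := ⟨f - 1, by omega⟩
    have hgt : ¬ P.reverse.length ≤ m' := by simp only [List.length_reverse, hP]; omega
    simp only [altLoop]
    rw [if_neg hgt]
    have hlen : (if P.reverse.headD 0 ≠ 0
        then altStep m' (PySem.Int.mod (P.reverse.headD 0 * binv) pvM) B.reverse P.reverse
        else P.reverse).length = P.length := by
      split
      · exact altStep_length B P m' _ (by omega) hB
      · simp
    set S' := (if P.reverse.headD 0 ≠ 0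
        then altStep m' (PySem.Int.mod (P.reverse.headD 0 * binv) pvM) B.reverse P.reverse
        else P.reverse) with hS'
    have hS'len : S'.length = m' + 1 + (d + 1) := by rw [hlen, hP]
    have hS'cons : S'.headD 0 :: S'.tail = S' :=
      headD_cons_tail (by intro hnil; rw [hnil] at hS'len; simp at hS'len)
    -- peel the last index m' + d + 1 off the reversed range
    have hc1 : (((m' + (d + 1) : Nat) : Int) + 1) = ((((m' + d : Nat) : Int) + 1) + 1) := by
      push_cast; ring
    have hc2 : (((m' + d : Nat) : Int) + 1) = (((m' + d + 1 : Nat) : Int)) := by push_cast; ring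
    have hstep := aStep_eq B P lead.reverse m' (m' + d + 1) binv (by omega) (by omega) hB
    rw [← hc2] at hstep
    rw [hc1, PySem.List.pyRange_one_succ_right (by push_cast; omega), List.reverse_append,
      List.reverse_singleton, List.singleton_append, List.foldl_cons, hstep, ← hS']
    have hstate : S'.reverse ++ lead.reverse = S'.tail.reverse ++ (lead ++ [S'.headD 0]).reverse := by
      conv_lhs => rw [← hS'cons]
      simp
    rw [hstate]
    have hih := ih f' (by omega) (lead ++ [S'.headD 0]) S'.tail.reverse
      (by simp only [List.length_reverse, List.length_tail, hS'len]; omega)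
    rw [List.reverse_reverse] at hih
    rw [hih]

-- B's stripped lead ++ S is A's remainder, reversed
theorem remEq (A B : List Int) (hA : A ≠ []) (hB : B ≠ []) (h : B.length ≤ A.length) :
    altRem A B ((B.length : Int) - 1)
      = (pvRrem A B ((B.length : Int) - 1) ((A.length : Int) - 1)).reverse := by
  have hB1 : 0 < B.length := List.length_pos_of_ne_nil hB
  have hA1 : 0 < A.length := List.length_pos_of_ne_nil hA
  obtain ⟨m', hBlen⟩ : ∃ m', B.length = m' + 1 := ⟨B.length - 1, by omega⟩
  obtain ⟨d, hPlen⟩ : ∃ d, A.length = m' + 1 + d := ⟨A.length - (m' + 1), by omega⟩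
  have htoNat : ((B.length : Int) - 1).toNat = m' := by omega
  have hfuel : d < A.length := by omega
  have hm : ((B.length : Int) - 1) = ((m' : Nat) : Int) := by omega
  have hn : ((A.length : Int) - 1) = ((m' + d : Nat) : Int) := by omega
  unfold altRem pvRrem pvStrip
  rw [htoNat, List.reverse_reverse, ← altTrim_eq, pvReduce_eq, hm, hn]
  have hli := loopInv B m' (pvInv (pvIdx B (-1))) hBlen d A.length hfuel [] A hPlen
  rw [List.reverse_nil, List.append_nil] at hli
  rw [hli]

-- scaling A's body in its res argument
theorem pvBody_scale (rec : List Int → List Int → Int) (A B : List Int) (n m s : Int) :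
    pvBody rec A B n m s = (s * pvBody rec A B n m 1) % pvM := by
  unfold pvBody
  split
  · rw [pvmod_def, pvmod_def, one_mul, pvmod_mul_right]
  · split
    · simp
    · rw [pvmod_def, pvmod_def, pvmod_def, pvmod_def,
        pvmod_mul_left, pvmod_mul_left, one_mul, pvmod_mul_right, mul_assoc]

-- B's body = res * (A's body at res = 1), given the relation one fuel level down
theorem altBody_eq (f : Nat)
    (hrec : ∀ A B r, A ≠ [] → B ≠ [] → altOuter f A B r = (r * resultantGo f A B) % pvM)
    (A B : List Int) (hA : A ≠ []) (hB : B ≠ []) (h : B.length ≤ A.length) (r : Int) :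
    altBody (altOuter f) A B ((A.length : Int) - 1) ((B.length : Int) - 1) r
      = (r * pvBody (resultantGo f) A B ((A.length : Int) - 1) ((B.length : Int) - 1) 1) % pvM := by
  unfold altBody pvBody
  by_cases hm : ((B.length : Int) - 1) = 0
  · rw [if_pos hm, if_pos hm, pvmod_def, pvmod_def, one_mul, pvmod_mul_right]
  · rw [if_neg hm, if_neg hm, remEq A B hA hB h]
    by_cases hR : pvRrem A B ((B.length : Int) - 1) ((A.length : Int) - 1) = []
    · simp [hR]
    · rw [if_neg (by simp [hR]), if_neg (by simp [List.length_eq_zero_iff, hR])]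
      simp only [List.reverse_reverse, List.length_reverse]
      rw [hrec _ _ _ hR hB, pvmod_def, pvmod_def, pvmod_def, one_mul,
        pvmod_mul_left, pvmod_mul_right]
      conv_rhs => rw [← mul_assoc, mul_comm r _, mul_assoc]
      rw [pvmod_mul_left]
      congr 1
      ring

-- the loop with accumulator res computes res * (the recursion's value), mod pvM
theorem altGo_eq_go (f : Nat) :
    ∀ A B r, A ≠ [] → B ≠ [] → altOuter f A B r = (r * resultantGo f A B) % pvM := by
  induction f with
  | zero => intro A B r _ _; simp [altOuter, resultantGo]
  | succ f ih =>
    intro A B r hA hB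
    simp only [altOuter, resultantGo]
    by_cases hsw : ((B.length : Int) - 1) > ((A.length : Int) - 1)
    · rw [if_pos hsw, if_pos hsw, altBody_eq f ih B A hB hA (by omega) _]
      conv_rhs => rw [pvBody_scale]
      rw [pvmod_mul_right]
      split_ifs <;> · congr 1; ring
    · rw [if_neg hsw, if_neg hsw]
      exact altBody_eq f ih A B hA hB (by omega) r

-- every value A's recursion returns is already reduced mod pvM
theorem go_mod (f : Nat) (A B : List Int) :
    resultantGo f A B % pvM = resultantGo f A B := by
  cases f with
  | zero => simp [resultantGo]
  | succ f =>
    simp only [resultantGo]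
    split <;>
    · unfold pvBody
      split
      · rw [pvmod_def, Int.emod_emod_of_dvd _ dvd_rfl]
      · split
        · simp
        · rw [pvmod_def, Int.emod_emod_of_dvd _ dvd_rfl]

-- ===== VERDICT (by name: the statement is the Claim_ definition above) =====
theorem resultant_spec : Claim_equal_resultant := by
  intro A B _ hpre
  obtain ⟨hA, hB, -⟩ := hpre
  unfold Spec_resultant resultant resultant_alt
  rw [altGo_eq_go _ _ _ _ hA hB, one_mul, go_mod]
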